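-- pv_equiv track=rewrite | github.com/HieuBuiATTT/Python-Ptit | PY01039.py | check
-- ===== SOURCE A (Python) =====
-- def check(n):
--     if len(n) < 2:
--         return "NO"
--
--     check1 = set(n)
--
--     if len(check1) != 2:
--         return "NO"
--
--     for i in range(len(n) - 2):
--         if n[i] != n[i+2]:
--             return "NO"
--     return "YES"
-- ===== SOURCE B (Python) =====
-- def check(n):
--     if len(n) < 2:
--         return "NO"
--     a, b = n[0], n[1]
--     if a == b:
--         return "NO"
--     expected = (a + b) * (len(n) // 2) + a * (len(n) % 2)
--     return "YES" if n == expected else "NO"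
-- ===== Notes on version B (the rewrite author's own statement) =====
-- stated objective: simpler
-- what changed: B builds the expected alternating pattern from the first two characters and does a single whole-string comparison, instead of A's set construction plus an index loop comparing n[i] with n[i+2].
import Mathlib
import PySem

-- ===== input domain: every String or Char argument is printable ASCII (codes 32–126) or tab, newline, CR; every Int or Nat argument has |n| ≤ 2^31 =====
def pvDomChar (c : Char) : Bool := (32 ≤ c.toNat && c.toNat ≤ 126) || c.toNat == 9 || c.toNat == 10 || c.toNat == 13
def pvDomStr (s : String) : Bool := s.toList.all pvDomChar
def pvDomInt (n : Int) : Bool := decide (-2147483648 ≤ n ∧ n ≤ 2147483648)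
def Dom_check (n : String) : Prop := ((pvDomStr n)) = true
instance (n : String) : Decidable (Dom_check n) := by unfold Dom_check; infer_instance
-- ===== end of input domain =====

-- B replaces A's set construction + index loop (n[i] vs n[i+2]) by building the expected
-- alternating string from the first two characters and one whole-string comparison (objective: simpler).

-- ===== PORT A =====
-- the for-loop over range(len(n)-2) with early return "NO"; indices are nonnegative,
-- so List.range / getElem? are exact for Python's range / n[i] here
def checkLoop (l : List Char) : List Nat → String
  | [] => "YES"
  | i :: rest =>
    match l[i]?, l[i+2]? with
    | some c, some d => if c ≠ d then "NO" else checkLoop l rest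
    | _, _ => "NO"

def check (n : String) : String :=
  let l := n.toList
  if l.length < 2 then "NO"
  else if (PySem.Set.ofList l).length ≠ 2 then "NO"
  else checkLoop l (List.range (l.length - 2))

-- ===== PORT B =====
def check_alt (n : String) : String :=
  let l := n.toList
  match l with
  | a :: b :: _ =>
    if a = b then "NO"
    else
      -- (a+b)*(len(n)//2) + a*(len(n)%2), as a list of characters
      let expected := (List.replicate (l.length / 2) [a, b]).flatten ++
                      List.replicate (l.length % 2) a
      if l = expected then "YES" else "NO"
  | _ => "NO"

-- ===== PRECONDITION & SPEC =====
def Spec_check (n : String) (out : String) : Prop := out = check_alt n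
instance (n : String) (out : String) : Decidable (Spec_check n out) := by unfold Spec_check; infer_instance

-- ===== CLAIM (what is proved, stated in full; the proofs are below) =====
def Claim_equal_check : Prop := ∀ (n : String), Dom_check n → Spec_check n (check n)

-- ===== LEMMAS AND PROOFS =====

-- the pure alternating pattern of length k starting a, b
def pvPattern (a b : Char) : Nat → List Char
  | 0 => []
  | k + 1 => a :: pvPattern b a k

theorem pvPattern_two (a b : Char) (k : Nat) :
    pvPattern a b (k + 2) = a :: b :: pvPattern a b k := rfl

theorem pvExpected_eq (a b : Char) :
    ∀ k, (List.replicate (k / 2) [a, b]).flatten ++ List.replicate (k % 2) a = pvPattern a b k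
  | 0 => by simp [pvPattern]
  | 1 => by simp [pvPattern]
  | (k + 2) => by
      have ih := pvExpected_eq a b k
      have h1 : (k + 2) / 2 = k / 2 + 1 := by omega
      have h2 : (k + 2) % 2 = k % 2 := by omega
      rw [h1, h2, List.replicate_succ, pvPattern_two]
      simpa using ih

theorem pvPattern_mem : ∀ (k : Nat) (a b x : Char), x ∈ pvPattern a b k → x = a ∨ x = b
  | 0, _, _, _, h => by simp [pvPattern] at h
  | (k + 1), a, b, x, h => by
      simp only [pvPattern, List.mem_cons] at h
      rcases h with h | h
      · exact Or.inl h
      · rcases pvPattern_mem k b a x h with h | h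
        · exact Or.inr h
        · exact Or.inl h

theorem pvPattern_self (a : Char) : ∀ k, pvPattern a a k = List.replicate k a
  | 0 => rfl
  | (k + 1) => by simp [pvPattern, pvPattern_self a k, List.replicate_succ]

-- period-2 condition
def AltP (l : List Char) : Prop := ∀ i : Nat, i + 2 < l.length → l[i]? = l[i + 2]?

theorem checkLoop_yes_or_no (l : List Char) : ∀ is, checkLoop l is = "YES" ∨ checkLoop l is = "NO"
  | [] => Or.inl rfl
  | i :: rest => by
      simp only [checkLoop]
      cases h1 : l[i]? with
      | none => exact Or.inr rfl
      | some c =>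
        cases h2 : l[i+2]? with
        | none => exact Or.inr rfl
        | some d =>
          by_cases hcd : c ≠ d
          · simp [hcd]
          · simpa [hcd] using checkLoop_yes_or_no l rest

theorem checkLoop_yes_iff (l : List Char) :
    ∀ is, (∀ i ∈ is, i + 2 < l.length) →
      (checkLoop l is = "YES" ↔ ∀ i ∈ is, l[i]? = l[i + 2]?)
  | [], _ => by simp [checkLoop]
  | i :: rest, h => by
      have hi : i + 2 < l.length := h i (List.mem_cons_self ..)
      have hlt : i < l.length := by omega
      have hc : l[i]? = some (l[i]'hlt) := List.getElem?_eq_getElem hlt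
      have hd : l[i+2]? = some (l[i+2]'hi) := List.getElem?_eq_getElem hi
      set c := l[i]'hlt with hcdef
      set d := l[i+2]'hi with hddef
      have ih := checkLoop_yes_iff l rest (fun j hj => h j (List.mem_cons_of_mem _ hj))
      simp only [checkLoop, hc, hd]
      by_cases hcd : c = d
      · rw [if_neg (show ¬ c ≠ d by simp [hcd])]
        constructor
        · intro hy j hj
          rcases List.mem_cons.mp hj with rfl | hj
          · rw [hc, hd, hcd]
          · exact (ih.mp (by simpa using hy)) j hj
        · intro hall
          exact ih.mpr (fun j hj => hall j (List.mem_cons_of_mem _ hj))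
      · simp only [ne_eq, hcd, not_false_eq_true, if_pos]
        constructor
        · intro hno; exact absurd hno (by decide)
        · intro hall
          have := hall i (List.mem_cons_self ..)
          rw [hc, hd] at this
          exact absurd (Option.some.inj this) hcd

theorem checkLoop_range_iff (l : List Char) (h : 2 ≤ l.length) :
    checkLoop l (List.range (l.length - 2)) = "YES" ↔ AltP l := by
  rw [checkLoop_yes_iff l _ (fun i hi => by have := List.mem_range.mp hi; omega)]
  constructor
  · intro hall i hi
    exact hall i (List.mem_range.mpr (by omega))
  · intro hA i hi
    exact hA i (by have := List.mem_range.mp hi; omega)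

theorem altP_step (a b c : Char) (t : List Char) :
    AltP (a :: b :: c :: t) ↔ a = c ∧ AltP (b :: c :: t) := by
  constructor
  · intro h
    constructor
    · have h0 := h 0 (by simp)
      simpa using h0
    · intro i hi
      have := h (i + 1) (by simp at hi ⊢; omega)
      simpa using this
  · rintro ⟨rfl, h⟩ i hi
    cases i with
    | zero => simp
    | succ j =>
      have := h j (by simp at hi ⊢; omega)
      simpa using this

theorem altP_iff_pattern :
    ∀ (t : List Char) (a b : Char),
      AltP (a :: b :: t) ↔ a :: b :: t = pvPattern a b (t.length + 2)
  | [], a, b => by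
      constructor
      · intro _; rfl
      · intro _ i hi
        have h2 : (a :: b :: ([] : List Char)).length = 2 := rfl
        omega
  | c :: t, a, b => by
      have ih := altP_iff_pattern t b c
      rw [altP_step]
      constructor
      · rintro ⟨hac, hA⟩
        subst hac
        have h2 := ih.mp hA
        rw [pvPattern_two] at h2
        have ht : t = pvPattern b a t.length := by simpa using h2
        show a :: b :: a :: t = pvPattern a b ((a :: t).length + 2)
        rw [show (a :: t).length + 2 = t.length + 1 + 2 from by simp, pvPattern_two,
           show pvPattern a b (t.length + 1) = a :: pvPattern b a t.length from rfl, ← ht]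
      · intro he
        rw [show (c :: t).length + 2 = t.length + 1 + 2 from by simp, pvPattern_two] at he
        have h3 : c :: t = pvPattern a b (t.length + 1) := by simpa using he
        rw [show pvPattern a b (t.length + 1) = a :: pvPattern b a t.length from rfl] at h3
        obtain ⟨rfl, ht⟩ : c = a ∧ t = pvPattern b a t.length := by simpa using h3
        refine ⟨rfl, ih.mpr ?_⟩
        rw [pvPattern_two]
        simpa using ht

theorem foldl_add_fixed (s : List Char) :
    ∀ rest : List Char, (∀ x ∈ rest, x ∈ s) → rest.foldl PySem.Set.add s = s
  | [], _ => rfl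
  | x :: rest, h => by
      have hx : PySem.Set.add s x = s := PySem.Set.add_of_mem (h x (List.mem_cons_self ..))
      simp only [List.foldl_cons, hx]
      exact foldl_add_fixed s rest (fun y hy => h y (List.mem_cons_of_mem _ hy))

theorem ofList_two (a b : Char) (hab : a ≠ b) (rest : List Char)
    (h : ∀ x ∈ rest, x = a ∨ x = b) :
    PySem.Set.ofList (a :: b :: rest) = [a, b] := by
  have h1 : PySem.Set.ofList (a :: b :: rest) = rest.foldl PySem.Set.add [a, b] := by
    rw [PySem.Set.ofList_eq_foldl]
    simp only [List.foldl_cons]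
    congr 1
    rw [show PySem.Set.add [] a = [a] from rfl,
       PySem.Set.add_of_not_mem (by simpa using Ne.symm hab)]
    rfl
  rw [h1]
  exact foldl_add_fixed [a, b] rest (fun x hx => by rcases h x hx with rfl | rfl <;> simp)

theorem ofList_one (a : Char) (rest : List Char) (h : ∀ x ∈ rest, x = a) :
    PySem.Set.ofList (a :: rest) = [a] := by
  have h1 : PySem.Set.ofList (a :: rest) = rest.foldl PySem.Set.add [a] := by
    rw [PySem.Set.ofList_eq_foldl]; rfl
  rw [h1]
  exact foldl_add_fixed [a] rest (fun x hx => by rw [h x hx]; simp)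

-- ===== VERDICT (by name: the statement is the Claim_ definition above) =====
theorem check_spec : Claim_equal_check := by
  intro n _
  unfold Spec_check check check_alt
  cases hl : n.toList with
  | nil => simp
  | cons a tl =>
    cases tl with
    | nil => simp
    | cons b t =>
      simp only []
      have hlen : (a :: b :: t).length = t.length + 2 := by simp
      have hnotlt : ¬ (a :: b :: t).length < 2 := by simp [hlen]
      rw [if_neg hnotlt]
      rw [pvExpected_eq a b]
      rw [hlen]
      have hloop := checkLoop_range_iff (a :: b :: t) (by simp [hlen])
      rw [hlen] at hloop
      simp only [Nat.add_sub_cancel] at hloop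
      by_cases hab : a = b
      · -- B returns "NO"; show A does too
        rw [if_pos hab]
        by_cases hset : (PySem.Set.ofList (a :: b :: t)).length ≠ 2
        · rw [if_pos hset]
        · rw [if_neg hset]
          rcases checkLoop_yes_or_no (a :: b :: t) (List.range t.length) with hy | hn
          · exfalso
            have hpat := (altP_iff_pattern t a b).mp (hloop.mp hy)
            subst hab
            rw [pvPattern_self] at hpat
            have : PySem.Set.ofList (a :: a :: t) = [a] := by
              apply ofList_one
              intro x hx
              have hmem : x ∈ a :: a :: t := List.mem_cons_of_mem _ hx
              rw [hpat] at hmem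
              exact List.eq_of_mem_replicate hmem
            rw [this] at hset
            simp at hset
          · exact hn
      · rw [if_neg hab]
        by_cases hpat : a :: b :: t = pvPattern a b (t.length + 2)
        · -- B returns "YES"; A too
          rw [if_pos hpat]
          have hset : PySem.Set.ofList (a :: b :: t) = [a, b] := by
            apply ofList_two a b hab
            intro x hx
            have hmem : x ∈ a :: b :: t := List.mem_cons_of_mem _ (List.mem_cons_of_mem _ hx)
            rw [hpat] at hmem
            exact pvPattern_mem _ a b x hmem
          rw [if_neg (by rw [hset]; simp)]
          exact hloop.mpr ((altP_iff_pattern t a b).mpr hpat)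
        · rw [if_neg hpat]
          by_cases hset : (PySem.Set.ofList (a :: b :: t)).length ≠ 2
          · rw [if_pos hset]
          · rw [if_neg hset]
            rcases checkLoop_yes_or_no (a :: b :: t) (List.range t.length) with hy | hn
            · exact absurd ((altP_iff_pattern t a b).mp (hloop.mp hy)) hpat
            · exact hn
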